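-- pv_equiv track=rewrite | github.com/Yejin6911/Algorithm_Study | minjoo/greedy/1700.py | latest
-- ===== SOURCE A (Python) =====
-- def latest(temp, tab):
--     late = [-1, 0] # 인덱스, 전기용품
--     for i in range(len(tab)):
--         if(tab[i] in temp):
--             idx = temp.index(tab[i])
--             if(idx > late[0]):
--                 late = [idx, i]
--         else:
--             return i
--     return late[1]
-- ===== SOURCE B (Python) =====
-- def latest(temp, tab):
--     # Phase 1: the first thing plugged in that never appears in temp wins outright.
--     for i, v in enumerate(tab):
--         if v not in temp:
--             return i
--     # Phase 2: every tab entry occurs in temp.  Walk the distinct values of temp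
--     # (first occurrences, in order) from the back; the first one present in tab
--     # is the one whose next use is furthest away.
--     seen = set()
--     order = []
--     for v in temp:
--         if v not in seen:
--             seen.add(v)
--             order.append(v)
--     for v in reversed(order):
--         if v in tab:
--             return tab.index(v)
--     return 0
-- ===== Notes on version B (the rewrite author's own statement) =====
-- stated objective: alternative
-- what changed: Instead of scanning tab while maintaining a running (max temp-index, position) pair, B first looks for a tab element absent from temp, and otherwise walks the distinct values of temp backwards (first-occurrence dedup) returning tab.index of the first one present in tab.
import Mathlib
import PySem

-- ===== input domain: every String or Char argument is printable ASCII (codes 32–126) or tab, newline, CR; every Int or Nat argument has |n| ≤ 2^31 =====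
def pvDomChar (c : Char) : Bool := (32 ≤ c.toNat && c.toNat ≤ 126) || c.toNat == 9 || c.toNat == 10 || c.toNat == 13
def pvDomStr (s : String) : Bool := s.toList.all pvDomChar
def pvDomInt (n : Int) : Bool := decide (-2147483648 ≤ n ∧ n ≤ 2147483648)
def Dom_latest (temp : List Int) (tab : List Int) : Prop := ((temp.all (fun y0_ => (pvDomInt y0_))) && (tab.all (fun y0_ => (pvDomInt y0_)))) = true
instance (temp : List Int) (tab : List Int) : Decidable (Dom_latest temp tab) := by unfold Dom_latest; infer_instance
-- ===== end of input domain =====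

-- B replaces A's running (max temp-index, position) scan of tab by a backward walk
-- over the distinct values of temp; same outputs, different traversal (objective: alternative).

-- ===== PORT A =====
-- loop 'for i in range(len(tab))' over tab[i], carrying late = [idx, i]
def latest_go (temp : List Int) : List (Int × Int) → Int × Int → Int
  | [], late => late.2
  | (i, v) :: rest, late =>
    if v ∈ temp then
      let idx : Int := ((PySem.List.index? temp v).getD 0 : Nat)
      if idx > late.1 then latest_go temp rest (idx, i) else latest_go temp rest late
    else i

def latest (temp : List Int) (tab : List Int) : Int :=
  latest_go temp (PySem.List.enumerate tab) (-1, 0)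

-- ===== PORT B =====
-- first loop of Source B: first i with tab[i] not in temp
def latest_alt_first (temp : List Int) : List (Int × Int) → Option Int
  | [] => none
  | (i, v) :: rest => if v ∈ temp then latest_alt_first temp rest else some i

-- dedup loop of Source B: seen-set + order list, first occurrences in order
def latest_alt_dedup : List Int → PySem.Set Int → List Int → List Int
  | [], _, order => order
  | v :: rest, seen, order =>
    if v ∈ seen then latest_alt_dedup rest seen order
    else latest_alt_dedup rest (PySem.Set.add seen v) (order ++ [v])

-- second loop of Source B: first v of the (reversed) dedup list present in tab
def latest_alt_scan (tab : List Int) : List Int → Int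
  | [] => 0
  | v :: rest =>
    if v ∈ tab then ((PySem.List.index? tab v).getD 0 : Nat) else latest_alt_scan tab rest

def latest_alt (temp : List Int) (tab : List Int) : Int :=
  match latest_alt_first temp (PySem.List.enumerate tab) with
  | some i => i
  | none =>
    let order := latest_alt_dedup temp PySem.Set.empty []
    latest_alt_scan tab order.reverse

-- ===== PRECONDITION & SPEC =====
def Spec_latest (temp : List Int) (tab : List Int) (out : Int) : Prop := out = latest_alt temp tab
instance (temp : List Int) (tab : List Int) (out : Int) : Decidable (Spec_latest temp tab out) := by unfold Spec_latest; infer_instance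

-- ===== CLAIM (what is proved, stated in full; the proofs are below) =====
def Claim_equal_latest : Prop := ∀ (temp : List Int) (tab : List Int), Dom_latest temp tab → Spec_latest temp tab (latest temp tab)

-- ===== LEMMAS AND PROOFS =====

-- key of a value: first index of v in temp
def kidx (temp : List Int) (v : Int) : Nat := (PySem.List.index? temp v).getD 0

-- A's loop body as a pure fold step (used once no early return can fire)
def stepA (temp : List Int) (late : Int × Int) (p : Int × Int) : Int × Int :=
  if ((kidx temp p.2 : Nat) : Int) > late.1 then (((kidx temp p.2 : Nat) : Int), p.1) else late

theorem kidx_some {temp : List Int} {v : Int} (h : v ∈ temp) :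
    PySem.List.index? temp v = some (kidx temp v) := by
  have := (PySem.List.index?_isSome_iff (xs := temp) (v := v)).2 h
  cases hx : PySem.List.index? temp v with
  | none => rw [hx] at this; simp at this
  | some k => simp only [kidx, hx, Option.getD_some]

theorem kidx_inj {temp : List Int} {u w : Int} (hu : u ∈ temp) (hw : w ∈ temp)
    (h : kidx temp u = kidx temp w) : u = w := by
  have h1 := kidx_some hu
  have h2 := kidx_some hw
  obtain ⟨hk1, he1, -⟩ := PySem.List.getElem_of_index?_eq_some h1
  obtain ⟨hk2, he2, -⟩ := PySem.List.getElem_of_index?_eq_some h2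
  simp only [h] at he1
  rw [← he1]
  exact he2

theorem go_of_first_some {temp : List Int} :
    ∀ (l : List (Int × Int)) (late : Int × Int) (i : Int),
    latest_alt_first temp l = some i → latest_go temp l late = i := by
  intro l
  induction l with
  | nil => intro late i h; simp [latest_alt_first] at h
  | cons p rest ih =>
    intro late i h
    obtain ⟨j, v⟩ := p
    by_cases hv : v ∈ temp
    · simp [latest_alt_first, hv] at h
      simp only [latest_go, if_pos hv]
      split
      · exact ih _ _ h
      · exact ih _ _ h
    · simp [latest_alt_first, hv] at h
      simp [latest_go, hv, h]

theorem first_none_mem {temp : List Int} :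
    ∀ {l : List (Int × Int)}, latest_alt_first temp l = none →
    ∀ p ∈ l, p.2 ∈ temp := by
  intro l
  induction l with
  | nil => intro _ p hp; simp at hp
  | cons q rest ih =>
    intro h p hp
    obtain ⟨j, v⟩ := q
    by_cases hv : v ∈ temp
    · simp only [latest_alt_first, if_pos hv] at h
      rcases List.mem_cons.1 hp with rfl | hp'
      · exact hv
      · exact ih h p hp'
    · simp [latest_alt_first, hv] at h

theorem go_eq_foldl {temp : List Int} :
    ∀ (l : List (Int × Int)) (late : Int × Int), (∀ p ∈ l, p.2 ∈ temp) →
    latest_go temp l late = (l.foldl (stepA temp) late).2 := by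
  intro l
  induction l with
  | nil => intro late _; simp [latest_go]
  | cons p rest ih =>
    intro late h
    obtain ⟨j, v⟩ := p
    have hv : v ∈ temp := h (j, v) (by simp)
    have hrest : ∀ p ∈ rest, p.2 ∈ temp := fun p hp => h p (by simp [hp])
    simp only [latest_go, if_pos hv, List.foldl_cons]
    by_cases hc : (((PySem.List.index? temp v).getD 0 : Nat) : Int) > late.1
    · rw [if_pos hc, ih _ hrest]
      have hs : stepA temp late (j, v) = ((((PySem.List.index? temp v).getD 0 : Nat) : Int), j) := by
        simp only [stepA, kidx]
        rw [if_pos hc]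
      rw [hs]
    · rw [if_neg hc, ih _ hrest]
      have hs : stepA temp late (j, v) = late := by
        simp only [stepA, kidx]
        rw [if_neg hc]
      rw [hs]

-- the argmax invariant of A's fold, by induction from the right
theorem foldl_stepA_spec (temp : List Int) :
    ∀ (tab : List Int), (∀ v ∈ tab, v ∈ temp) → tab ≠ [] →
    ∃ v ∈ tab,
      (PySem.List.enumerate tab).foldl (stepA temp) (-1, 0) =
        (((kidx temp v : Nat) : Int), (((PySem.List.index? tab v).getD 0 : Nat) : Int)) ∧
      ∀ w ∈ tab, kidx temp w ≤ kidx temp v := by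
  intro tab
  induction tab using List.reverseRecOn with
  | nil => intro _ h; simp at h
  | append_singleton l x ih =>
    intro hall _
    have hx : x ∈ temp := hall x (by simp)
    have hl : ∀ v ∈ l, v ∈ temp := fun v hv => hall v (by simp [hv])
    have henum : PySem.List.enumerate (l ++ [x]) =
        PySem.List.enumerate l ++ [((l.length : Int), x)] := by
      rw [PySem.List.enumerate_append]
      simp [PySem.List.enumerate_cons, PySem.List.enumerate_nil]
    rcases eq_or_ne l [] with rfl | hne
    · refine ⟨x, by simp, ?_, ?_⟩
      · simp only [List.nil_append, PySem.List.enumerate_cons, PySem.List.enumerate_nil,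
          List.foldl_cons, List.foldl_nil, stepA, kidx]
        rw [if_pos (by omega), PySem.List.index?_cons_self]
        simp
      · intro w hw; simp at hw; subst hw; exact le_refl _
    · obtain ⟨v, hv, heq, hmax⟩ := ih hl hne
      rw [henum, List.foldl_append, heq]
      by_cases hc : kidx temp v < kidx temp x
      · have hxl : x ∉ l := by
          intro hxl
          exact absurd (hmax x hxl) (by omega)
        refine ⟨x, by simp, ?_, ?_⟩
        · simp only [List.foldl_cons, List.foldl_nil, stepA]
          rw [if_pos (by exact_mod_cast hc)]
          rw [PySem.List.index?_append_singleton_self _ _ hxl]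
          simp
        · intro w hw
          rcases (List.mem_append.1 hw) with hw | hw
          · exact le_of_lt (lt_of_le_of_lt (hmax w hw) hc)
          · simp at hw; subst hw; exact le_refl _
      · refine ⟨v, by simp [hv], ?_, ?_⟩
        · simp only [List.foldl_cons, List.foldl_nil, stepA]
          rw [if_neg (by simp; exact_mod_cast not_lt.1 hc)]
          rw [PySem.List.index?_append_of_mem _ hv]
        · intro w hw
          rcases (List.mem_append.1 hw) with hw | hw
          · exact hmax w hw
          · simp at hw; subst hw; exact not_lt.1 hc

-- Source B's second loop is find-first-hit
theorem scan_eq_find (tab : List Int) :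
    ∀ (l : List Int), latest_alt_scan tab l =
      match l.find? (fun v => decide (v ∈ tab)) with
      | none => 0
      | some v => (((PySem.List.index? tab v).getD 0 : Nat) : Int) := by
  intro l
  induction l with
  | nil => simp [latest_alt_scan]
  | cons v rest ih =>
    by_cases hv : v ∈ tab
    · simp [latest_alt_scan, hv, List.find?]
    · simp [latest_alt_scan, hv, List.find?, ih]

-- the dedup list computed by Source B's second loop
def bOrder (temp : List Int) : List Int := latest_alt_dedup temp PySem.Set.empty []

theorem set_add_not_mem {seen : PySem.Set Int} {v : Int} (h : v ∉ seen) :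
    PySem.Set.add seen v = seen ++ [v] := by
  simp [PySem.Set.add, PySem.Set.contains, h]

theorem dedup_append : ∀ (l : List Int) (seen : PySem.Set Int) (acc : List Int),
    latest_alt_dedup l seen acc = acc ++ latest_alt_dedup l seen [] := by
  intro l
  induction l with
  | nil => intro seen acc; simp [latest_alt_dedup]
  | cons v rest ih =>
    intro seen acc
    by_cases hv : v ∈ seen
    · simp only [latest_alt_dedup, if_pos hv]
      exact ih seen acc
    · simp only [latest_alt_dedup, if_neg hv]
      rw [ih _ (acc ++ [v]), ih _ ([] ++ [v])]
      simp

theorem dedup_mem : ∀ (l : List Int) (seen : PySem.Set Int) (v : Int),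
    v ∈ latest_alt_dedup l seen [] ↔ v ∈ l ∧ v ∉ seen := by
  intro l
  induction l with
  | nil => intro seen v; simp [latest_alt_dedup]
  | cons u rest ih =>
    intro seen v
    by_cases hu : u ∈ seen
    · simp only [latest_alt_dedup, if_pos hu]
      rw [ih]
      constructor
      · exact fun ⟨h1, h2⟩ => ⟨List.mem_cons_of_mem _ h1, h2⟩
      · rintro ⟨h1, h2⟩
        rcases List.mem_cons.1 h1 with rfl | h1'
        · exact absurd hu h2
        · exact ⟨h1', h2⟩
    · simp only [latest_alt_dedup, if_neg hu]
      rw [dedup_append, set_add_not_mem hu]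
      constructor
      · intro h
        rcases List.mem_append.1 h with h | h
        · simp at h; subst h; exact ⟨by simp, hu⟩
        · obtain ⟨h1, h2⟩ := (ih _ _).1 h
          simp at h2
          exact ⟨List.mem_cons_of_mem _ h1, h2.1⟩
      · rintro ⟨h1, h2⟩
        rcases List.mem_cons.1 h1 with rfl | h1'
        · simp
        · by_cases hvu : v = u
          · subst hvu; simp
          · refine List.mem_append.2 (Or.inr ((ih _ _).2 ⟨h1', ?_⟩))
            simp [h2, hvu]

theorem kidx_prefix {pre rest : List Int} {v : Int} (h : v ∉ pre) :
    kidx (pre ++ v :: rest) v = pre.length := by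
  have : PySem.List.index? (pre ++ v :: rest) v = some pre.length :=
    (PySem.List.index?_eq_some_iff _ _ _).2 ⟨pre, rest, rfl, rfl, h⟩
  have h2 : List.idxOf? v (pre ++ v :: rest) = some pre.length := by simpa using this
  simp [kidx, h2]

theorem kidx_lower {pre rest : List Int} {w : Int} (hw : w ∈ pre ++ rest) (hnp : w ∉ pre) :
    pre.length ≤ kidx (pre ++ rest) w := by
  have hs := kidx_some hw
  obtain ⟨hk, he, -⟩ := PySem.List.getElem_of_index?_eq_some hs
  by_contra hlt
  push Not at hlt
  apply hnp
  rw [← he]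
  rw [List.getElem_append_left (by omega)]
  exact List.getElem_mem _

theorem dedup_pairwise : ∀ (l pre : List Int) (seen : PySem.Set Int),
    (∀ w, w ∈ seen ↔ w ∈ pre) →
    (latest_alt_dedup l seen []).Pairwise
      (fun u w => kidx (pre ++ l) u < kidx (pre ++ l) w) := by
  intro l
  induction l with
  | nil => intro pre seen _; simp [latest_alt_dedup]
  | cons v rest ih =>
    intro pre seen hinv
    have hshift : pre ++ v :: rest = (pre ++ [v]) ++ rest := by simp
    by_cases hv : v ∈ seen
    · simp only [latest_alt_dedup, if_pos hv]
      have hinv' : ∀ w, w ∈ seen ↔ w ∈ pre ++ [v] := by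
        intro w
        rw [hinv]
        constructor
        · intro h; exact List.mem_append.2 (Or.inl h)
        · intro h
          rcases List.mem_append.1 h with h | h
          · exact h
          · simp at h; rw [h]; exact (hinv v).1 hv
      have := ih (pre ++ [v]) seen hinv'
      rw [hshift]
      simpa using this
    · simp only [latest_alt_dedup, if_neg hv]
      rw [dedup_append]
      have hvpre : v ∉ pre := fun h => hv ((hinv v).2 h)
      have hinv' : ∀ w, w ∈ PySem.Set.add seen v ↔ w ∈ pre ++ [v] := by
        intro w
        rw [set_add_not_mem hv]
        simp only [List.mem_append, List.mem_singleton]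
        rw [hinv]
      have hpw := ih (pre ++ [v]) (PySem.Set.add seen v) hinv'
      simp only [List.nil_append, List.singleton_append, List.pairwise_cons]
      constructor
      · intro w hw
        obtain ⟨hwr, hws⟩ := (dedup_mem _ _ _).1 hw
        have hwpre : w ∉ pre ++ [v] := fun h => hws ((hinv' w).2 h)
        have h1 : kidx (pre ++ v :: rest) v = pre.length := kidx_prefix hvpre
        have h2 : (pre ++ [v]).length ≤ kidx ((pre ++ [v]) ++ rest) w :=
          kidx_lower (List.mem_append.2 (Or.inr hwr)) hwpre
        rw [hshift] at h1 ⊢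
        rw [h1]
        have : pre.length < (pre ++ [v]).length := by simp
        omega
      · rw [hshift]
        simpa using hpw

theorem bOrder_pairwise (temp : List Int) :
    (bOrder temp).Pairwise (fun u w => kidx temp u < kidx temp w) := by
  have := dedup_pairwise temp [] PySem.Set.empty (by simp [PySem.Set.empty])
  simpa [bOrder] using this

theorem mem_bOrder {temp : List Int} {v : Int} (hv : v ∈ temp) : v ∈ bOrder temp :=
  (dedup_mem _ _ _).2 ⟨hv, by simp [PySem.Set.empty]⟩

theorem bOrder_subset {temp : List Int} {v : Int} (hv : v ∈ bOrder temp) : v ∈ temp :=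
  ((dedup_mem _ _ _).1 hv).1

-- ===== VERDICT (by name: the statement is the Claim_ definition above) =====
theorem latest_spec : Claim_equal_latest := by
  intro temp tab _
  unfold Spec_latest latest latest_alt
  cases hfirst : latest_alt_first temp (PySem.List.enumerate tab) with
  | some i => simp [go_of_first_some _ _ _ hfirst]
  | none =>
    have hall : ∀ v ∈ tab, v ∈ temp := by
      intro v hv
      obtain ⟨k, hk, hvk⟩ := List.getElem_of_mem hv
      exact first_none_mem hfirst ((k : Int), v)
        ((PySem.List.mem_enumerate_iff _ _ _).2 ⟨k, hk, by simp [hvk]⟩)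
    simp only []
    rw [go_eq_foldl _ _ (fun p hp => first_none_mem hfirst p hp)]
    rw [show latest_alt_dedup temp PySem.Set.empty [] = bOrder temp from rfl]
    rw [scan_eq_find]
    rcases eq_or_ne tab [] with rfl | hne
    · rw [List.find?_eq_none.2 (by simp)]
      simp [PySem.List.enumerate_nil]
    · obtain ⟨v, hv, heq, hmax⟩ := foldl_stepA_spec temp tab hall hne
      rw [heq]
      cases hfind : (bOrder temp).reverse.find? (fun w => decide (w ∈ tab)) with
      | none =>
        exfalso
        rw [List.find?_eq_none] at hfind
        exact hfind v (by rw [List.mem_reverse]; exact mem_bOrder (hall v hv)) (by simp [hv])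
      | some v0 =>
        obtain ⟨hv0tab, as, bs, hdec, hnotab⟩ := List.find?_eq_some_iff_append.1 hfind
        simp only [decide_eq_true_eq] at hv0tab
        have horder : bOrder temp = bs.reverse ++ v0 :: as.reverse := by
          have := congrArg List.reverse hdec
          simpa using this
        have hv0temp : v0 ∈ temp := bOrder_subset (by rw [horder]; simp)
        have hmax0 : ∀ w ∈ tab, kidx temp w ≤ kidx temp v0 := by
          intro w hw
          have hwo : w ∈ bOrder temp := mem_bOrder (hall w hw)
          rw [horder] at hwo
          rcases List.mem_append.1 hwo with hwb | hwv
          · have hpw := bOrder_pairwise temp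
            rw [horder] at hpw
            have := (List.pairwise_append.1 hpw).2.2 w hwb v0 (by simp)
            exact this.le
          · rcases List.mem_cons.1 hwv with rfl | hwa
            · exact le_refl _
            · exfalso
              have := hnotab w (by rw [List.mem_reverse] at hwa; exact hwa)
              simp at this
              exact this hw
        have : v = v0 :=
          kidx_inj (hall v hv) hv0temp
            (le_antisymm (hmax0 v hv) (hmax v0 hv0tab))
        rw [this]
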